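-- pv_equiv track=rewrite | github.com/rostizado12345/Snoop-s-dough- | app.py | parse_months
-- ===== SOURCE A (Python) =====
-- from typing import Dict, List, Tuple
--
-- def parse_months(value: str) -> List[int]:
--     if value is None:
--         return []
--     text = str(value).strip()
--     if not text:
--         return []
--     months = []
--     for part in text.split(","):
--         part = part.strip()
--         if part.isdigit():
--             m = int(part)
--             if 1 <= m <= 12:
--                 months.append(m)
--     return sorted(list(set(months)))
-- ===== SOURCE B (Python) =====
-- def parse_months(value):
--     if value is None:
--         return []
--     text = str(value).strip()
--     if not text:
--         return []
--     tokens = [p.strip() for p in text.split(",")]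
--     return [m for m in range(1, 13)
--             if any(t.isdigit() and int(t) == m for t in tokens)]
-- ===== Notes on version B (the rewrite author's own statement) =====
-- stated objective: alternative
-- what changed: Instead of collecting accepted tokens into a list and finishing with sorted(list(set(...))), B inverts the loops: it iterates the fixed ordered month domain 1..12 and for each month searches the stripped token list for a digit token with that value, so the sorted unique output falls out of the domain scan with no sort, set or accumulator.
import Mathlib
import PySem

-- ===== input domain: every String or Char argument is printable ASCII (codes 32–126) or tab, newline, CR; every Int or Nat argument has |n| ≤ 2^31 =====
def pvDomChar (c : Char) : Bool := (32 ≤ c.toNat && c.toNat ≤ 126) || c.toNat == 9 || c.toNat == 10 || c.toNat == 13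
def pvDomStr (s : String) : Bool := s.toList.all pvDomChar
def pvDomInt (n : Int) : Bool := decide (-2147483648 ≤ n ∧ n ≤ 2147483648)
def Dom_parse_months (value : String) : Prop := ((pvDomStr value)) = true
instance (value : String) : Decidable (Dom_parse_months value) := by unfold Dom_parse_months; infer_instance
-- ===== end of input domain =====

set_option maxHeartbeats 1000000


-- B inverts the loops: it scans the fixed ordered month domain 1..12 and searches the token
-- list for each month, so no sort/set/accumulator is needed (objective: alternative).

-- ===== PORT A =====
def parse_months (value : String) : List Int :=
  let text := PySem.Str.strip value
  if text = "" then []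
  else
    -- text.split(","): sep is nonempty, so split? is always some; .getD [] is unreachable
    let months := ((PySem.Str.split? text ",").getD []).foldl (fun months part =>
      let part := PySem.Str.strip part
      if PySem.Str.strIsdigit part then
        -- int(part): part.isdigit() on a printable-ASCII string guarantees success; the .getD 0 default is unreachable
        let m := (PySem.Int.ofStr? part).getD 0
        if 1 ≤ m ∧ m ≤ 12 then months ++ [m] else months
      else months) []
    PySem.List.sorted (PySem.Set.ofList months) (fun x => x) false

-- ===== PORT B =====
def parse_months_alt (value : String) : List Int :=
  let text := PySem.Str.strip value
  if text = "" then []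
  else
    -- text.split(","): sep is nonempty, so split? is always some; .getD [] is unreachable
    let tokens := ((PySem.Str.split? text ",").getD []).map PySem.Str.strip
    (PySem.List.pyRange 1 13 1).filter (fun m =>
      tokens.any (fun t => PySem.Str.strIsdigit t &&
        -- int(t): t.isdigit() on a printable-ASCII string guarantees success; the .getD 0 default is unreachable
        ((PySem.Int.ofStr? t).getD 0 == m)))

-- ===== PRECONDITION & SPEC =====
def Spec_parse_months (value : String) (out : List Int) : Prop := out = parse_months_alt value
instance (value : String) (out : List Int) : Decidable (Spec_parse_months value out) := by unfold Spec_parse_months; infer_instance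

-- ===== CLAIM =====
def Claim_equal_parse_months : Prop := ∀ (value : String), Dom_parse_months value → Spec_parse_months value (parse_months value)

-- ===== LEMMAS AND PROOFS =====

theorem pvFold_range (parts : List String) (ms : List Int)
    (hms : ∀ x ∈ ms, 1 ≤ x ∧ x ≤ 12) :
    ∀ x ∈ parts.foldl (fun months part =>
      let part := PySem.Str.strip part
      if PySem.Str.strIsdigit part then
        let m := (PySem.Int.ofStr? part).getD 0
        if 1 ≤ m ∧ m ≤ 12 then months ++ [m] else months
      else months) ms, 1 ≤ x ∧ x ≤ 12 := by
  induction parts generalizing ms with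
  | nil => exact hms
  | cons p ps ih =>
    simp only [List.foldl_cons]
    apply ih
    intro x hx
    split_ifs at hx with h1 h2
    · rcases List.mem_append.mp hx with h | h
      · exact hms x h
      · simp only [List.mem_singleton] at h
        omega
    · exact hms x hx
    · exact hms x hx

theorem pvMem_fold (parts : List String) (ms : List Int) (m : Int) :
    (m ∈ parts.foldl (fun months part =>
      let part := PySem.Str.strip part
      if PySem.Str.strIsdigit part then
        let mm := (PySem.Int.ofStr? part).getD 0
        if 1 ≤ mm ∧ mm ≤ 12 then months ++ [mm] else months
      else months) ms)
    ↔ m ∈ ms ∨ ∃ p ∈ parts,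
        PySem.Str.strIsdigit (PySem.Str.strip p) = true ∧
        (PySem.Int.ofStr? (PySem.Str.strip p)).getD 0 = m ∧ 1 ≤ m ∧ m ≤ 12 := by
  induction parts generalizing ms with
  | nil => simp
  | cons p ps ih =>
    simp only [List.foldl_cons, ih, List.mem_cons]
    constructor
    · rintro (hm | ⟨q, hq, hh⟩)
      · split_ifs at hm with h1 h2
        · rcases List.mem_append.mp hm with h | h
          · exact Or.inl h
          · simp only [List.mem_singleton] at h
            subst h
            exact Or.inr ⟨p, Or.inl rfl, h1, rfl, h2⟩
        · exact Or.inl hm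
        · exact Or.inl hm
      · exact Or.inr ⟨q, Or.inr hq, hh⟩
    · rintro (hm | ⟨q, (rfl | hq), hd, hv, hr⟩)
      · left
        split_ifs with h1 h2
        · exact List.mem_append.mpr (Or.inl hm)
        · exact hm
        · exact hm
      · left
        subst hv
        simp only [hd, if_true, hr, and_self, if_true]
        exact List.mem_append.mpr (Or.inr (List.mem_singleton.mpr rfl))
      · exact Or.inr ⟨q, hq, hd, hv, hr⟩

theorem pvSorted_set_eq_filter (ms : List Int) (hms : ∀ x ∈ ms, 1 ≤ x ∧ x ≤ 12) :
    PySem.List.sorted (PySem.Set.ofList ms) (fun x => x) false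
      = (PySem.List.pyRange 1 13 1).filter (fun m => decide (m ∈ ms)) := by
  apply PySem.List.sorted_eq_of_perm_of_pairwise_lt
  · apply (List.perm_ext_iff_of_nodup ?_ (PySem.Set.nodup_ofList ms)).mpr
    · intro a
      simp only [List.mem_filter, PySem.Set.mem_ofList, PySem.List.mem_pyRange_one,
        decide_eq_true_eq]
      constructor
      · exact fun h => h.2
      · intro h
        exact ⟨by have := hms a h; omega, h⟩
    · exact (show ((PySem.List.pyRange 1 13 1) : List Int).Nodup by decide).sublist
        List.filter_sublist
  · exact (show ((PySem.List.pyRange 1 13 1) : List Int).Pairwise (· < ·) by decide).sublist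
      List.filter_sublist

-- ===== VERDICT =====
theorem parse_months_spec : Claim_equal_parse_months := by
  intro value _
  unfold Spec_parse_months parse_months parse_months_alt
  by_cases h : PySem.Str.strip value = ""
  · simp [h]
  · simp only [h, if_false]
    set parts := (PySem.Str.split? (PySem.Str.strip value) ",").getD [] with hparts
    set ms := parts.foldl (fun months part =>
      let part := PySem.Str.strip part
      if PySem.Str.strIsdigit part then
        let m := (PySem.Int.ofStr? part).getD 0
        if 1 ≤ m ∧ m ≤ 12 then months ++ [m] else months
      else months) [] with hms_def
    have hrange : ∀ x ∈ ms, 1 ≤ x ∧ x ≤ 12 := by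
      rw [hms_def]
      exact pvFold_range _ [] (by simp)
    rw [pvSorted_set_eq_filter ms hrange]
    apply List.filter_congr
    intro m hm
    rw [PySem.List.mem_pyRange_one] at hm
    have hmem := pvMem_fold parts [] m
    rw [← hms_def] at hmem
    simp only [List.not_mem_nil, false_or] at hmem
    simp only [hmem, List.any_map]
    rw [Bool.eq_iff_iff]
    simp only [decide_eq_true_eq, List.any_eq_true, Function.comp_apply,
      Bool.and_eq_true, beq_iff_eq]
    constructor
    · rintro ⟨p, hp, hd, hv, _⟩
      exact ⟨p, hp, hd, hv⟩
    · rintro ⟨p, hp, hd, hv⟩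
      exact ⟨p, hp, hd, hv, hm.1, by omega⟩
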